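-- pv_equiv track=rewrite | github.com/cxsy/Code | Python/algorithms/first_larger_one_in_both_sides.py | first_larger_one_in_both_sides
-- ===== SOURCE A (Python) =====
-- def first_larger_one_in_both_sides(arr):
--     n = len(arr)
--     sta = []
--     res = [[-1] * 2 for _ in range(n)]
--     # not less than
--     # for i in range(n):
--     #     while sta and arr[sta[-1]] <= arr[i]:
--     #         if res[i][0] == -1 and arr[sta[-1]] == arr[i]:
--     #             res[i][0] = sta[-1]
--     #         res[sta.pop()][1] = i
--     #     if res[i][0] == -1:
--     #         res[i][0] = sta[-1] if sta else -1
--     #     sta.append(i)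
--     # return res
--     # larger
--     for i in range(n):
--         while sta and arr[sta[-1]] < arr[i]:
--             res[sta.pop()][1] = i
--         if sta:
--             if arr[sta[-1]] > arr[i]:
--                 res[i][0] = sta[-1]
--             else:
--                 res[i][0] = res[sta[-1]][0]
--         else:
--             res[i][0] = -1
--         sta.append(i)
--     return res
-- ===== SOURCE B (Python) =====
-- def first_larger_one_in_both_sides(arr):
--     n = len(arr)
--     res = []
--     for i in range(n):
--         left = -1
--         for j in range(i - 1, -1, -1):
--             if arr[j] > arr[i]:
--                 left = j
--                 break
--         right = -1
--         for j in range(i + 1, n):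
--             if arr[j] > arr[i]:
--                 right = j
--                 break
--         res.append([left, right])
--     return res
-- ===== Notes on version B (the rewrite author's own statement) =====
-- stated objective: simpler
-- what changed: Replaced the single monotonic-stack pass with in-place result patching by a direct per-index brute-force scan: for each i, scan left for the nearest strictly larger element and scan right for the first strictly larger one.
import Mathlib
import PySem

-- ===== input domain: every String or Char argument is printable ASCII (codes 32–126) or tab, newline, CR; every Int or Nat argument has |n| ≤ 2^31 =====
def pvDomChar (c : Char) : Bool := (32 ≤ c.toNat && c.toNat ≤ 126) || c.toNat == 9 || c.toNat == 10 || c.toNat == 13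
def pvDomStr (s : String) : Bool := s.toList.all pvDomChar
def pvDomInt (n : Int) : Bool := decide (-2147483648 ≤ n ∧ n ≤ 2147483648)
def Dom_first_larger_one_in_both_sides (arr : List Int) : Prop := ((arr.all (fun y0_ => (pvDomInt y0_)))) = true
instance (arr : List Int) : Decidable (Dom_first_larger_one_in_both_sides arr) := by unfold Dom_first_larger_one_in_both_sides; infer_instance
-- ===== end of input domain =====

-- B replaces A's single monotonic-stack pass by direct per-index left/right scans: simpler, not faster.

-- ===== PORT A =====
-- Python list indices here are always natural and in range, so arr[j] is ported as arr.getD j 0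
-- (exact on every index the program uses); the Python stack 'sta' (top = last) is a List Nat with
-- the top at the head (append = cons, sta[-1] = head).

-- res[t][1] = v
def pvSet2 (res : List (List Int)) (t : Nat) (v : Int) : List (List Int) :=
  res.set t ((res.getD t []).set 1 v)

-- res[i][0] = v
def pvSet1 (res : List (List Int)) (i : Nat) (v : Int) : List (List Int) :=
  res.set i ((res.getD i []).set 0 v)

-- the inner 'while sta and arr[sta[-1]] < arr[i]: res[sta.pop()][1] = i'
def pvPopA (arr : List Int) (i : Nat) : List Nat → List (List Int) → List Nat × List (List Int)
  | [], res => ([], res)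
  | t :: rest, res =>
    if arr.getD t 0 < arr.getD i 0 then pvPopA arr i rest (pvSet2 res t (i : Int))
    else (t :: rest, res)

-- one iteration of A's 'for i in range(n)' body
def pvStepA (arr : List Int) (st : List Nat × List (List Int)) (i : Nat) : List Nat × List (List Int) :=
  let p := pvPopA arr i st.1 st.2
  let res :=
    match p.1 with
    | [] => pvSet1 p.2 i (-1)
    | t :: _ =>
      if arr.getD t 0 > arr.getD i 0 then pvSet1 p.2 i (t : Int)
      else pvSet1 p.2 i ((p.2.getD t []).getD 0 0)
  (i :: p.1, res)

def first_larger_one_in_both_sides (arr : List Int) : List (List Int) :=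
  ((List.range arr.length).foldl (pvStepA arr) ([], List.replicate arr.length [-1, -1])).2

-- ===== PORT B =====
-- 'for j in range(i-1, -1, -1): if arr[j] > arr[i]: left = j; break' — checks j-1 first, counts down
def pvLgo (arr : List Int) (x : Int) : Nat → Int
  | 0 => -1
  | j + 1 => if arr.getD j 0 > x then (j : Int) else pvLgo arr x j

-- 'for j in range(i+1, n): if arr[j] > arr[i]: right = j; break' — k counts up, fuel = n - k
def pvRgo (arr : List Int) (x : Int) : Nat → Nat → Int
  | _, 0 => -1
  | k, f + 1 => if arr.getD k 0 > x then (k : Int) else pvRgo arr x (k + 1) f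

def first_larger_one_in_both_sides_alt (arr : List Int) : List (List Int) :=
  (List.range arr.length).map (fun i =>
    [pvLgo arr (arr.getD i 0) i, pvRgo arr (arr.getD i 0) (i + 1) (arr.length - (i + 1))])

-- ===== PRECONDITION & SPEC =====
def Spec_first_larger_one_in_both_sides (arr : List Int) (out : List (List Int)) : Prop := out = first_larger_one_in_both_sides_alt arr
instance (arr : List Int) (out : List (List Int)) : Decidable (Spec_first_larger_one_in_both_sides arr out) := by unfold Spec_first_larger_one_in_both_sides; infer_instance

-- ===== CLAIM (what is proved, stated in full; the proofs are below) =====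
def Claim_equal_first_larger_one_in_both_sides : Prop := ∀ (arr : List Int), Dom_first_larger_one_in_both_sides arr → Spec_first_larger_one_in_both_sides arr (first_larger_one_in_both_sides arr)

-- ===== LEMMAS AND PROOFS =====

-- the pop predicate of A's inner while-loop
def pvP (arr : List Int) (i t : Nat) : Bool := decide (arr.getD t 0 < arr.getD i 0)

-- A's stack after processing indices 0..i-1 (head = top)
def pvStk (arr : List Int) : Nat → List Nat
  | 0 => []
  | i + 1 => i :: (pvStk arr i).dropWhile (pvP arr i)

-- intended first column after processing 0..i-1
def pvLv (arr : List Int) (i j : Nat) : Int :=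
  if j < i then pvLgo arr (arr.getD j 0) j else -1

-- intended second column after processing 0..i-1
def pvRb (arr : List Int) (i j : Nat) : Int :=
  pvRgo arr (arr.getD j 0) (j + 1) (i - (j + 1))

theorem pvP_true (arr : List Int) (i t : Nat) :
    pvP arr i t = true ↔ arr.getD t 0 < arr.getD i 0 := by
  unfold pvP; exact decide_eq_true_iff

theorem pvP_false (arr : List Int) (i t : Nat) :
    pvP arr i t = false ↔ ¬(arr.getD t 0 < arr.getD i 0) := by
  unfold pvP; exact decide_eq_false_iff_not

-- generic: surviving elements of a value-sorted stack are ≥ the cut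
theorem pv_dw_ge (arr : List Int) (i : Nat) :
    ∀ l : List Nat, l.Pairwise (fun s t => arr.getD s 0 ≤ arr.getD t 0) →
    ∀ x ∈ l.dropWhile (pvP arr i), arr.getD i 0 ≤ arr.getD x 0 := by
  intro l
  induction l with
  | nil => intro _ x hx; simp [List.dropWhile] at hx
  | cons t rest ih =>
    intro h x hx
    rw [List.pairwise_cons] at h
    by_cases hp : arr.getD t 0 < arr.getD i 0
    · rw [List.dropWhile_cons_of_pos ((pvP_true arr i t).mpr hp)] at hx
      exact ih h.2 x hx
    · rw [List.dropWhile_cons_of_neg (by rw [(pvP_false arr i t).mpr hp]; simp)] at hx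
      have hti : arr.getD i 0 ≤ arr.getD t 0 := by omega
      rcases List.mem_cons.mp hx with rfl | hx'
      · exact hti
      · exact le_trans hti (h.1 x hx')

theorem pv_mem_dropWhile {α : Type} (p : α → Bool) (l : List α) (x : α)
    (hx : x ∈ l) (hp : p x = false) : x ∈ l.dropWhile p := by
  have h := List.takeWhile_append_dropWhile (p := p) (l := l)
  rw [← h] at hx
  rcases List.mem_append.mp hx with h1 | h2
  · have := List.mem_takeWhile_imp h1
    rw [hp] at this; cases this
  · exact h2

theorem pvStk_lt (arr : List Int) : ∀ i, ∀ t ∈ pvStk arr i, t < i := by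
  intro i
  induction i with
  | zero => intro t ht; simp [pvStk] at ht
  | succ i ih =>
    intro t ht
    rcases List.mem_cons.mp ht with rfl | h2
    · omega
    · have := ih t ((List.dropWhile_sublist _).subset h2)
      omega

theorem pvStk_pairwise (arr : List Int) :
    ∀ i, (pvStk arr i).Pairwise (fun s t => t < s ∧ arr.getD s 0 ≤ arr.getD t 0) := by
  intro i
  induction i with
  | zero => simp [pvStk]
  | succ i ih =>
    rw [pvStk, List.pairwise_cons]
    refine ⟨?_, ih.sublist (List.dropWhile_sublist _)⟩
    intro x hx
    refine ⟨pvStk_lt arr i x ((List.dropWhile_sublist _).subset hx), ?_⟩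
    exact pv_dw_ge arr i (pvStk arr i) (ih.imp (fun h => h.2)) x hx

theorem pvStk_char (arr : List Int) :
    ∀ i j, j ∈ pvStk arr i ↔
      (j < i ∧ ∀ k, j < k → k < i → arr.getD k 0 ≤ arr.getD j 0) := by
  intro i
  induction i with
  | zero =>
    intro j
    constructor
    · intro h; simp [pvStk] at h
    · rintro ⟨h, -⟩; omega
  | succ i ih =>
    intro j
    constructor
    · intro hj
      rcases List.mem_cons.mp hj with rfl | h2
      · exact ⟨Nat.lt_succ_self j, fun k h1 h2 => by omega⟩
      · have hmem : j ∈ pvStk arr i := (List.dropWhile_sublist _).subset h2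
        obtain ⟨hji, hcond⟩ := (ih j).mp hmem
        refine ⟨by omega, ?_⟩
        intro k hk1 hk2
        rcases Nat.lt_succ_iff_lt_or_eq.mp hk2 with h | rfl
        · exact hcond k hk1 h
        · exact pv_dw_ge arr k (pvStk arr k)
            ((pvStk_pairwise arr k).imp (fun h => h.2)) j h2
    · rintro ⟨hj, hcond⟩
      by_cases hji : j = i
      · subst hji; exact List.mem_cons_self ..
      · have hji' : j < i := by omega
        have hmem := (ih j).mpr ⟨hji', fun k h1 h2 => hcond k h1 (by omega)⟩
        have hp : pvP arr i j = false := by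
          rw [pvP_false]
          have := hcond i hji' (Nat.lt_succ_self i)
          omega
        exact List.mem_cons_of_mem _ (pv_mem_dropWhile _ _ _ hmem hp)

-- everything above lb and below i is < arr[i], provided the stack elements above lb are
theorem pv_below_lt (arr : List Int) (i : Nat) (lb : Int)
    (H : ∀ m ∈ pvStk arr i, lb < (m : Int) → arr.getD m 0 < arr.getD i 0) :
    ∀ k : Nat, lb < (k : Int) → k < i → arr.getD k 0 < arr.getD i 0 := by
  suffices aux : ∀ d (k : Nat), lb < (k : Int) → k < i → i - k ≤ d → arr.getD k 0 < arr.getD i 0 by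
    intro k h1 h2; exact aux (i - k) k h1 h2 le_rfl
  intro d
  induction d with
  | zero => intro k _ h2 h3; omega
  | succ d ihd =>
    intro k h1 h2 h3
    by_cases hk : k ∈ pvStk arr i
    · exact H k hk h1
    · rw [pvStk_char] at hk
      push Not at hk
      obtain ⟨m, hm1, hm2, hm3⟩ := hk h2
      have hmi : arr.getD m 0 < arr.getD i 0 :=
        ihd m (by omega) hm2 (by omega)
      omega

theorem pvRgo_none (arr : List Int) (x : Int) :
    ∀ f k, (∀ k', k ≤ k' → k' < k + f → arr.getD k' 0 ≤ x) → pvRgo arr x k f = -1 := by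
  intro f
  induction f with
  | zero => intro k _; simp [pvRgo]
  | succ f ihf =>
    intro k h
    rw [pvRgo, if_neg (by have := h k le_rfl (by omega); omega)]
    exact ihf (k + 1) (fun k' h1 h2 => h k' (by omega) (by omega))

theorem pvRgo_nonneg (arr : List Int) (x : Int) :
    ∀ f k, (∃ k', k ≤ k' ∧ k' < k + f ∧ x < arr.getD k' 0) → 0 ≤ pvRgo arr x k f := by
  intro f
  induction f with
  | zero => rintro k ⟨k', h1, h2, _⟩; omega
  | succ f ihf =>
    rintro k ⟨k', h1, h2, h3⟩
    rw [pvRgo]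
    by_cases h : arr.getD k 0 > x
    · rw [if_pos h]; positivity
    · rw [if_neg h]
      refine ihf (k + 1) ⟨k', ?_, by omega, h3⟩
      rcases Nat.eq_or_lt_of_le h1 with rfl | hlt
      · omega
      · omega

theorem pvRgo_succ (arr : List Int) (x : Int) :
    ∀ f k, pvRgo arr x k (f + 1) =
      if pvRgo arr x k f = -1 then (if x < arr.getD (k + f) 0 then ((k + f : Nat) : Int) else -1)
      else pvRgo arr x k f := by
  intro f
  induction f with
  | zero => intro k; simp [pvRgo]
  | succ f ihf =>
    intro k
    by_cases hc : arr.getD k 0 > x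
    · rw [pvRgo, if_pos hc]
      rw [show pvRgo arr x k (f + 1) = if arr.getD k 0 > x then ((k : Nat) : Int)
            else pvRgo arr x (k + 1) f from rfl, if_pos hc]
      rw [if_neg (by omega)]
    · rw [pvRgo, if_neg hc, ihf (k + 1)]
      rw [show pvRgo arr x k (f + 1) = if arr.getD k 0 > x then ((k : Nat) : Int)
            else pvRgo arr x (k + 1) f from rfl, if_neg hc]
      rw [show k + 1 + f = k + (f + 1) by omega]

theorem pvLgo_none (arr : List Int) (x : Int) :
    ∀ m, (∀ k, k < m → arr.getD k 0 ≤ x) → pvLgo arr x m = -1 := by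
  intro m
  induction m with
  | zero => intro _; simp [pvLgo]
  | succ m ihm =>
    intro h
    rw [pvLgo, if_neg (by have := h m (by omega); omega)]
    exact ihm (fun k hk => h k (by omega))

theorem pvLgo_skip (arr : List Int) (x : Int) :
    ∀ m m', m' ≤ m → (∀ k, m' ≤ k → k < m → arr.getD k 0 ≤ x) →
      pvLgo arr x m = pvLgo arr x m' := by
  intro m
  induction m with
  | zero => intro m' h1 _; interval_cases m'; rfl
  | succ m ihm =>
    intro m' h1 h2
    by_cases he : m' = m + 1
    · subst he; rfl
    · have h1' : m' ≤ m := by omega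
      rw [pvLgo, if_neg (by have := h2 m h1' (by omega); omega)]
      exact ihm m' h1' (fun k a b => h2 k a (by omega))

theorem pvPopA_spec (arr : List Int) (i : Nat) :
    ∀ s res, pvPopA arr i s res =
      (s.dropWhile (pvP arr i),
       (s.takeWhile (pvP arr i)).foldl (fun r t => pvSet2 r t (i : Int)) res) := by
  intro s
  induction s with
  | nil => intro res; simp [pvPopA]
  | cons t rest ih =>
    intro res
    by_cases h : arr.getD t 0 < arr.getD i 0
    · have hp : pvP arr i t = true := (pvP_true arr i t).mpr h
      rw [pvPopA, if_pos h, ih, List.dropWhile_cons_of_pos hp,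
        List.takeWhile_cons_of_pos hp, List.foldl_cons]
    · have hp : pvP arr i t = false := (pvP_false arr i t).mpr h
      rw [pvPopA, if_neg h, List.dropWhile_cons_of_neg (by rw [hp]; simp),
        List.takeWhile_cons_of_neg (by rw [hp]; simp), List.foldl_nil]

theorem pv_fold_set2_get (i : Nat) :
    ∀ (P : List Nat) (res : List (List Int)), P.Nodup → (∀ t ∈ P, t < res.length) →
      (P.foldl (fun r t => pvSet2 r t (i : Int)) res).length = res.length ∧
      ∀ j, (j ∈ P → (P.foldl (fun r t => pvSet2 r t (i : Int)) res)[j]? =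
              some ((res.getD j []).set 1 (i : Int))) ∧
           (j ∉ P → (P.foldl (fun r t => pvSet2 r t (i : Int)) res)[j]? = res[j]?) := by
  intro P
  induction P with
  | nil =>
    intro res _ _
    exact ⟨rfl, fun j => ⟨fun h => by simp at h, fun _ => rfl⟩⟩
  | cons t P' ih =>
    intro res hnd hb
    rw [List.foldl_cons]
    have hlt : t < res.length := hb t (List.mem_cons_self ..)
    obtain ⟨ht, hnd'⟩ := List.nodup_cons.mp hnd
    have hlen2 : (pvSet2 res t (i : Int)).length = res.length := by
      rw [pvSet2, List.length_set]
    obtain ⟨hlen, hget⟩ := ih (pvSet2 res t (i : Int)) hnd'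
      (fun u hu => by rw [hlen2]; exact hb u (List.mem_cons_of_mem _ hu))
    refine ⟨by rw [hlen, hlen2], ?_⟩
    intro j
    constructor
    · intro hj
      rcases List.mem_cons.mp hj with rfl | hj'
      · rw [(hget j).2 ht]
        rw [pvSet2]
        exact List.getElem?_set_eq_of_lt _ hlt
      · have hjt : j ≠ t := fun h => ht (h ▸ hj')
        rw [(hget j).1 hj']
        suffices hs : (pvSet2 res t (i : Int)).getD j [] = res.getD j [] by rw [hs]
        rw [List.getD_eq_getElem?_getD, List.getD_eq_getElem?_getD, pvSet2,
          List.getElem?_set_ne (fun h => hjt h.symm)]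
    · intro hj
      rw [List.mem_cons] at hj
      push Not at hj
      rw [(hget j).2 hj.2, pvSet2, List.getElem?_set_ne (fun h => hj.1 h.symm)]

theorem pv_main (arr : List Int) :
    ∀ i, i ≤ arr.length →
      ((List.range i).foldl (pvStepA arr) ([], List.replicate arr.length [-1, -1])).1
        = pvStk arr i ∧
      ((List.range i).foldl (pvStepA arr) ([], List.replicate arr.length [-1, -1])).2.length
        = arr.length ∧
      ∀ j, j < arr.length →
        ((List.range i).foldl (pvStepA arr) ([], List.replicate arr.length [-1, -1])).2[j]?
          = some [pvLv arr i j, pvRb arr i j] := by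
  intro i
  induction i with
  | zero =>
    intro _
    refine ⟨rfl, by simp, ?_⟩
    intro j hj
    simp only [List.range_zero, List.foldl_nil]
    rw [List.getElem?_replicate, if_pos hj]
    have e1 : pvLv arr 0 j = -1 := by unfold pvLv; rw [if_neg (by omega)]
    have e2 : pvRb arr 0 j = -1 := by
      unfold pvRb; rw [show 0 - (j + 1) = 0 by omega]; rfl
    rw [e1, e2]
  | succ i ih =>
    intro hn
    have hi : i < arr.length := hn
    obtain ⟨h1, hlen, hg⟩ := ih (le_of_lt hi)
    rw [List.range_succ, List.foldl_append, List.foldl_cons, List.foldl_nil]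
    generalize hF : (List.range i).foldl (pvStepA arr)
      ([], List.replicate arr.length [-1, -1]) = F at h1 hlen hg ⊢
    obtain ⟨S, R⟩ := F
    simp only at h1 hlen hg
    subst h1
    simp only [pvStepA]
    rw [pvPopA_spec]
    dsimp only
    set D := (pvStk arr i).dropWhile (pvP arr i) with hD
    set T := (pvStk arr i).takeWhile (pvP arr i) with hT
    set res1 := List.foldl (fun r t => pvSet2 r t (i : Int)) R T with hres1def
    -- generic facts
    have hSnd : (pvStk arr i).Nodup := (pvStk_pairwise arr i).imp (fun h => by omega)
    have hTnd : T.Nodup := hSnd.sublist (List.takeWhile_sublist _)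
    have hTsub : ∀ t ∈ T, t ∈ pvStk arr i := fun t ht => (List.takeWhile_sublist _).subset ht
    have hTbound : ∀ t ∈ T, t < R.length := by
      intro t ht
      have := pvStk_lt arr i t (hTsub t ht)
      omega
    obtain ⟨hlen1, hG⟩ := pv_fold_set2_get i T R hTnd hTbound
    rw [← hres1def] at hlen1 hG
    have hlen1' : res1.length = arr.length := by rw [hlen1, hlen]
    have hsplitTD : T ++ D = pvStk arr i := List.takeWhile_append_dropWhile
    have hTval : ∀ t ∈ T, arr.getD t 0 < arr.getD i 0 :=
      fun t ht => (pvP_true arr i t).mp (List.mem_takeWhile_imp ht)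
    have hDval : ∀ t ∈ D, arr.getD i 0 ≤ arr.getD t 0 :=
      pv_dw_ge arr i (pvStk arr i) ((pvStk_pairwise arr i).imp (fun h => h.2))
    -- entries of res1 away from i already have their final value
    have hres1j : ∀ j, j < arr.length → j ≠ i →
        res1[j]? = some [pvLv arr (i + 1) j, pvRb arr (i + 1) j] := by
      intro j hj hij
      by_cases hjT : j ∈ T
      · have hjS := hTsub j hjT
        have hjlt : j < i := pvStk_lt arr i j hjS
        have hcond := ((pvStk_char arr i j).mp hjS).2
        rw [(hG j).1 hjT]
        have hgd : R.getD j [] = [pvLv arr i j, pvRb arr i j] := by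
          rw [List.getD_eq_getElem?_getD, hg j hj]; rfl
        rw [hgd]
        have hLv : pvLv arr i j = pvLv arr (i + 1) j := by
          unfold pvLv; rw [if_pos hjlt, if_pos (by omega)]
        have hRb : pvRb arr (i + 1) j = (i : Int) := by
          unfold pvRb
          rw [show i + 1 - (j + 1) = (i - (j + 1)) + 1 by omega, pvRgo_succ,
            pvRgo_none arr _ _ _ (fun k' hk1 hk2 => hcond k' (by omega) (by omega)),
            if_pos rfl, show (j + 1) + (i - (j + 1)) = i by omega,
            if_pos (hTval j hjT)]
        rw [show ([pvLv arr i j, pvRb arr i j].set 1 (i : Int))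
              = [pvLv arr i j, (i : Int)] from rfl, hLv, hRb]
      · rw [(hG j).2 hjT, hg j hj]
        rcases Nat.lt_or_ge j i with hjlt | hjge
        · have hLv : pvLv arr i j = pvLv arr (i + 1) j := by
            unfold pvLv; rw [if_pos hjlt, if_pos (by omega)]
          by_cases hjS : j ∈ pvStk arr i
          · have hjD : j ∈ D := by
              rw [← hsplitTD] at hjS
              rcases List.mem_append.mp hjS with h | h
              · exact absurd h hjT
              · exact h
            have hgej := hDval j hjD
            have hcond := ((pvStk_char arr i j).mp hjS).2
            have hRi : pvRb arr i j = -1 :=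
              pvRgo_none arr _ _ _ (fun k' h1 h2 => hcond k' (by omega) (by omega))
            have hRi1 : pvRb arr (i + 1) j = -1 := by
              unfold pvRb
              rw [show i + 1 - (j + 1) = (i - (j + 1)) + 1 by omega, pvRgo_succ]
              rw [show pvRgo arr (arr.getD j 0) (j + 1) (i - (j + 1)) = -1 from hRi]
              rw [if_pos rfl, show (j + 1) + (i - (j + 1)) = i by omega,
                if_neg (by omega)]
            rw [hLv, hRi, hRi1]
          · obtain ⟨m, hm1, hm2, hm3⟩ :
                ∃ m, j < m ∧ m < i ∧ arr.getD j 0 < arr.getD m 0 := by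
              rw [pvStk_char] at hjS
              push Not at hjS
              obtain ⟨m, ha, hb2, hc⟩ := hjS hjlt
              exact ⟨m, ha, hb2, by omega⟩
            have hnn : 0 ≤ pvRb arr i j :=
              pvRgo_nonneg arr _ _ _ ⟨m, by omega, by omega, hm3⟩
            have hRe : pvRb arr (i + 1) j = pvRb arr i j := by
              unfold pvRb
              rw [show i + 1 - (j + 1) = (i - (j + 1)) + 1 by omega, pvRgo_succ,
                if_neg (by unfold pvRb at hnn; omega)]
            rw [hLv, hRe]
        · have hLv : pvLv arr i j = pvLv arr (i + 1) j := by
            unfold pvLv; rw [if_neg (by omega), if_neg (by omega)]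
          have hRb : pvRb arr (i + 1) j = pvRb arr i j := by
            unfold pvRb
            rw [show i + 1 - (j + 1) = 0 by omega, show i - (j + 1) = 0 by omega]
          rw [hLv, hRb]
    have hres1i : res1[i]? = some [(-1 : Int), (-1 : Int)] := by
      have hiT : i ∉ T := fun h => absurd (pvStk_lt arr i i (hTsub i h)) (lt_irrefl i)
      rw [(hG i).2 hiT, hg i hi]
      have e1 : pvLv arr i i = -1 := by unfold pvLv; rw [if_neg (by omega)]
      have e2 : pvRb arr i i = -1 := by
        unfold pvRb; rw [show i - (i + 1) = 0 by omega]; rfl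
      rw [e1, e2]
    have e2i : pvRb arr (i + 1) i = -1 := by
      unfold pvRb; rw [show i + 1 - (i + 1) = 0 by omega]; rfl
    -- shared finish: writing the new first column entry at index i
    have finish : ∀ v : Int, pvLv arr (i + 1) i = v →
        (pvSet1 res1 i v).length = arr.length ∧
        ∀ j, j < arr.length →
          (pvSet1 res1 i v)[j]? = some [pvLv arr (i + 1) j, pvRb arr (i + 1) j] := by
      intro v hv
      refine ⟨by rw [pvSet1, List.length_set]; exact hlen1', ?_⟩
      intro j hj
      by_cases hij : j = i
      · subst hij
        have hgi : res1.getD j [] = [-1, -1] := by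
          rw [List.getD_eq_getElem?_getD, hres1i]; rfl
        rw [pvSet1, hgi, List.getElem?_set_eq_of_lt _ (by rw [hlen1']; exact hj)]
        rw [show ([(-1 : Int), -1].set 0 v) = [v, -1] from rfl, ← hv, e2i]
      · rw [pvSet1, List.getElem?_set_ne (fun h => hij h.symm)]
        exact hres1j j hj hij
    clear_value D T res1
    refine ⟨by rw [pvStk, ← hD], ?_, ?_⟩ <;>
    · rcases hdc : D with - | ⟨t, rest⟩
      all_goals dsimp only
      case nil =>
        -- every index below i was popped: arr[k] < arr[i] for all k < i
        have hall : ∀ k, k < i → arr.getD k 0 < arr.getD i 0 := by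
          have H : ∀ m ∈ pvStk arr i, (-1 : Int) < (m : Int) →
              arr.getD m 0 < arr.getD i 0 := by
            intro m hm _
            have hmTD : m ∈ T ++ D := by rw [hsplitTD]; exact hm
            rcases List.mem_append.mp hmTD with hmT | hmD
            · exact hTval m hmT
            · rw [hdc] at hmD; simp at hmD
          intro k hk
          exact pv_below_lt arr i (-1) H k (by omega) hk
        have e1 : pvLv arr (i + 1) i = -1 := by
          unfold pvLv
          rw [if_pos (by omega)]
          exact pvLgo_none arr _ i (fun k hk => le_of_lt (hall k hk))
        first
        | exact (finish (-1) e1).1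
        | exact (finish (-1) e1).2
      case cons =>
        have htD : t ∈ D := by rw [hdc]; exact List.mem_cons_self ..
        have htS : t ∈ pvStk arr i := by
          rw [← hsplitTD]
          exact List.mem_append.mpr (Or.inr htD)
        have hti : t < i := pvStk_lt arr i t htS
        have hge : arr.getD i 0 ≤ arr.getD t 0 := hDval t htD
        have hbet : ∀ k, t < k → k < i → arr.getD k 0 < arr.getD i 0 := by
          have H : ∀ m ∈ pvStk arr i, (t : Int) < (m : Int) →
              arr.getD m 0 < arr.getD i 0 := by
            intro m hm hmt
            have hmTD : m ∈ T ++ D := by rw [hsplitTD]; exact hm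
            rcases List.mem_append.mp hmTD with hmT | hmD
            · exact hTval m hmT
            · exfalso
              rw [hdc] at hmD
              rcases List.mem_cons.mp hmD with rfl | hmrest
              · omega
              · have hpD : D.Pairwise (fun s u => u < s ∧ arr.getD s 0 ≤ arr.getD u 0) := by
                  rw [hD]
                  exact (pvStk_pairwise arr i).sublist (List.dropWhile_sublist _)
                rw [hdc] at hpD
                have := (List.pairwise_cons.mp hpD).1 m hmrest
                omega
          intro k hk1 hk2
          exact pv_below_lt arr i (t : Int) H k (by omega) hk2
        have hskip : pvLgo arr (arr.getD i 0) i = pvLgo arr (arr.getD i 0) (t + 1) :=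
          pvLgo_skip arr _ i (t + 1) (by omega)
            (fun k hk1 hk2 => le_of_lt (hbet k (by omega) hk2))
        by_cases hgt : arr.getD t 0 > arr.getD i 0
        · rw [if_pos hgt]
          have hv : pvLv arr (i + 1) i = (t : Int) := by
            unfold pvLv
            rw [if_pos (by omega), hskip, pvLgo, if_pos hgt]
          first
          | exact (finish _ hv).1
          | exact (finish _ hv).2
        · rw [if_neg hgt]
          have heq : arr.getD t 0 = arr.getD i 0 := by omega
          have htT : t ∉ T := fun h => by have := hTval t h; omega
          have hrt : res1.getD t [] = [pvLv arr i t, pvRb arr i t] := by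
            rw [List.getD_eq_getElem?_getD, (hG t).2 htT, hg t (by omega)]; rfl
          have hv : pvLv arr (i + 1) i = (res1.getD t []).getD 0 0 := by
            rw [hrt]
            show pvLv arr (i + 1) i = pvLv arr i t
            unfold pvLv
            rw [if_pos (by omega), if_pos hti, hskip, pvLgo, if_neg hgt, heq]
          first
          | exact (finish _ hv).1
          | exact (finish _ hv).2

-- ===== VERDICT (by name: the statement is the Claim_ definition above) =====
theorem first_larger_one_in_both_sides_spec : Claim_equal_first_larger_one_in_both_sides := by
  intro arr _
  unfold Spec_first_larger_one_in_both_sides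
  obtain ⟨-, hlen, hg⟩ := pv_main arr arr.length le_rfl
  unfold first_larger_one_in_both_sides first_larger_one_in_both_sides_alt
  apply List.ext_getElem?
  intro j
  by_cases hj : j < arr.length
  · rw [hg j hj, List.getElem?_map]
    have hr : (List.range arr.length)[j]? = some j := by simp [hj]
    rw [hr, Option.map_some]
    have e1 : pvLv arr arr.length j = pvLgo arr (arr.getD j 0) j := by
      unfold pvLv; rw [if_pos hj]
    rw [e1]; rfl
  · rw [List.getElem?_eq_none (by omega), List.getElem?_eq_none (by simp; omega)]
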